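-- pv_equiv track=rewrite | github.com/devnish23/AI_Project | repos/local_LLM_GUI/local/GUI_6_with_explination_autoselect_Model.py | select_model_by_prompt
-- ===== SOURCE A (Python) =====
-- PROMPT_MODEL_MAP = {
--     # PowerPoint generation
--     "ppt": "pptgen",
--     "powerpoint": "pptgen",
--     "presentation": "pptgen",
--     "create ppt": "pptgen",
--     "download ppt": "pptgen",
--
--     # Code generation
--     "code": "codegen",
--     "generate code": "codegen",
--     "write code": "codegen",
--
--     # Summarization
--     "summarize": "summarizer",
--     "summary": "summarizer",
--
--     # Translation
--     "translate": "translator",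
--     "translation": "translator",
--
--     # Image generation
--     "image": "imagegen",
--     "picture": "imagegen",
--     "generate image": "imagegen",
-- }
--
-- def select_model_by_prompt(prompt, models):
--     prompt_lower = prompt.lower()
--     # Sort keywords by length (longest first) for more specific matches
--     for keyword in sorted(PROMPT_MODEL_MAP, key=len, reverse=True):
--         model_name = PROMPT_MODEL_MAP[keyword]
--         if keyword in prompt_lower:
--             # Check if the mapped model exists in the available models
--             for model in models:
--                 if model[0] == model_name:
--                     return model_name
--     return None
-- ===== SOURCE B (Python) =====
-- PROMPT_MODEL_MAP = {
--     # PowerPoint generation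
--     "ppt": "pptgen",
--     "powerpoint": "pptgen",
--     "presentation": "pptgen",
--     "create ppt": "pptgen",
--     "download ppt": "pptgen",
--
--     # Code generation
--     "code": "codegen",
--     "generate code": "codegen",
--     "write code": "codegen",
--
--     # Summarization
--     "summarize": "summarizer",
--     "summary": "summarizer",
--
--     # Translation
--     "translate": "translator",
--     "translation": "translator",
--
--     # Image generation
--     "image": "imagegen",
--     "picture": "imagegen",
--     "generate image": "imagegen",
-- }
--
-- def select_model_by_prompt(prompt, models):
--     prompt_lower = prompt.lower()
--     # One linear pass over the map: keep the longest matching keyword whose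
--     # model is available; strict '>' lets insertion order break length ties.
--     best_len = -1
--     best_model = None
--     for keyword, model_name in PROMPT_MODEL_MAP.items():
--         if keyword in prompt_lower and len(keyword) > best_len \
--                 and any(m[0] == model_name for m in models):
--             best_len = len(keyword)
--             best_model = model_name
--     return best_model
-- ===== Notes on version B (the rewrite author's own statement) =====
-- stated objective: alternative
-- what changed: Replaces sort-the-keywords-then-return-first-hit with a single linear pass over the map that tracks the longest matching keyword whose model is available (strict > preserves insertion-order tie-breaking), so no sorted copy of the keyword list is built.
import Mathlib
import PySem

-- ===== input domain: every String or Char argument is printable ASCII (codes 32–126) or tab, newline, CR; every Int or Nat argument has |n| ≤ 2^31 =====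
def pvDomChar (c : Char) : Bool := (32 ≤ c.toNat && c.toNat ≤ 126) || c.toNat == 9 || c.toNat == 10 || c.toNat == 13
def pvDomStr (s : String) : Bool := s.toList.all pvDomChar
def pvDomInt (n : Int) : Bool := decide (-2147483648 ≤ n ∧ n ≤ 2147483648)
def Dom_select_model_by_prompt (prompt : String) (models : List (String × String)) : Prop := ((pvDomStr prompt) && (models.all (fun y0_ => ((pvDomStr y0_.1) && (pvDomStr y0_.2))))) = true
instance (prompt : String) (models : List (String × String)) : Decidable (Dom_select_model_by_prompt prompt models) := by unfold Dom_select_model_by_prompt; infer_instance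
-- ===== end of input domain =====

-- B replaces A's sort-the-keywords-then-return-first-hit with a single linear pass over the
-- keyword map that tracks the longest available match (objective: alternative decomposition).

-- ===== PORT A =====
-- the module-level dict literal PROMPT_MODEL_MAP (insertion order, all keys distinct)
def PROMPT_MODEL_MAP : PySem.Dict String String := ⟨[
  ("ppt", "pptgen"), ("powerpoint", "pptgen"), ("presentation", "pptgen"),
  ("create ppt", "pptgen"), ("download ppt", "pptgen"),
  ("code", "codegen"), ("generate code", "codegen"), ("write code", "codegen"),
  ("summarize", "summarizer"), ("summary", "summarizer"),
  ("translate", "translator"), ("translation", "translator"),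
  ("image", "imagegen"), ("picture", "imagegen"), ("generate image", "imagegen")]⟩

-- inner loop of A: 'for model in models: if model[0] == model_name: return model_name'
def pvInnerA (models : List (String × String)) (model_name : String) : Option String :=
  match models with
  | [] => none
  | model :: rest => if model.1 == model_name then some model_name else pvInnerA rest model_name

-- outer loop of A over the sorted keyword list; PROMPT_MODEL_MAP[keyword] is ported as getD
-- with default "" — exact here, since every keyword iterated is a key of the dict
def pvOuterA (prompt_lower : String) (models : List (String × String)) : List String → Option String
  | [] => none
  | keyword :: rest =>
    let model_name := PySem.Dict.getD PROMPT_MODEL_MAP keyword ""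
    if PySem.Str.isIn keyword prompt_lower then
      match pvInnerA models model_name with
      | some r => some r
      | none => pvOuterA prompt_lower models rest
    else pvOuterA prompt_lower models rest

def select_model_by_prompt (prompt : String) (models : List (String × String)) : Option String :=
  let prompt_lower := PySem.Str.lower prompt
  pvOuterA prompt_lower models
    (PySem.List.sorted (PySem.Dict.keys PROMPT_MODEL_MAP) (fun k => PySem.Str.len k) true)

-- ===== PORT B =====
def select_model_by_prompt_alt (prompt : String) (models : List (String × String)) : Option String :=
  let prompt_lower := PySem.Str.lower prompt
  let st := (PySem.Dict.items PROMPT_MODEL_MAP).foldl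
    (fun (st : Int × Option String) p =>
      if PySem.Str.isIn p.1 prompt_lower && decide (PySem.Str.len p.1 > st.1)
          && models.any (fun m => m.1 == p.2)
      then (PySem.Str.len p.1, some p.2) else st)
    (-1, none)
  st.2

-- ===== PRECONDITION & SPEC =====
def Spec_select_model_by_prompt (prompt : String) (models : List (String × String)) (out : Option String) : Prop := out = select_model_by_prompt_alt prompt models
instance (prompt : String) (models : List (String × String)) (out : Option String) : Decidable (Spec_select_model_by_prompt prompt models out) := by unfold Spec_select_model_by_prompt; infer_instance

-- ===== CLAIM (what is proved, stated in full; the proofs are below) =====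
def Claim_equal_select_model_by_prompt : Prop := ∀ (prompt : String) (models : List (String × String)), Dom_select_model_by_prompt prompt models → Spec_select_model_by_prompt prompt models (select_model_by_prompt prompt models)

-- ===== LEMMAS AND PROOFS =====

def pvChain {α : Type} : List (Bool × Option α) → Option α
  | [] => none
  | (b, o) :: rest => if b then o else pvChain rest

def pvStep {α : Type} (st : Int × Option α) (t : Bool × Int × Option α) : Int × Option α :=
  if t.1 && decide (t.2.1 > st.1) then (t.2.1, t.2.2) else st

def pvFoldB {α : Type} (l : List (Bool × Int × Option α)) (st : Int × Option α) : Int × Option α :=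
  l.foldl pvStep st

def pvIns {α : Type} (t : Bool × Int × Option α) : List (Bool × Int × Option α) → List (Bool × Int × Option α)
  | [] => [t]
  | u :: rest => if t.2.1 ≤ u.2.1 then u :: pvIns t rest else t :: u :: rest

def pvSortD {α : Type} (l : List (Bool × Int × Option α)) : List (Bool × Int × Option α) :=
  l.foldl (fun s t => pvIns t s) []

def pvFirst {α : Type} : List (Bool × Int × Option α) → Int × Option α
  | [] => (-1, none)
  | (b, n, o) :: rest => if b then (n, o) else pvFirst rest

theorem pvFirst_snd {α : Type} (l : List (Bool × Int × Option α)) :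
    (pvFirst l).2 = pvChain (l.map fun t => (t.1, t.2.2)) := by
  induction l with
  | nil => rfl
  | cons t rest ih =>
    obtain ⟨b, n, o⟩ := t
    cases b <;> simp [pvFirst, pvChain, ih]

theorem pvFirst_fst_le {α : Type} (l : List (Bool × Int × Option α)) (m : Int)
    (hm : -1 ≤ m) (h : ∀ v ∈ l, v.2.1 ≤ m) : (pvFirst l).1 ≤ m := by
  induction l with
  | nil => simpa [pvFirst]
  | cons u rest ih =>
    obtain ⟨b, n, o⟩ := u
    cases b
    · exact ih (fun v hv => h v (List.mem_cons_of_mem _ hv))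
    · simpa [pvFirst] using h (true, n, o) List.mem_cons_self

theorem pvMem_ins {α : Type} (t u : Bool × Int × Option α) (l : List (Bool × Int × Option α))
    (h : u ∈ pvIns t l) : u = t ∨ u ∈ l := by
  induction l with
  | nil => simpa [pvIns] using h
  | cons v rest ih =>
    by_cases hc : t.2.1 ≤ v.2.1
    · simp only [pvIns, if_pos hc, List.mem_cons] at h
      rcases h with h | h
      · exact Or.inr (by simp [h])
      · rcases ih h with h | h
        · exact Or.inl h
        · exact Or.inr (List.mem_cons_of_mem _ h)
    · simp only [pvIns, if_neg hc, List.mem_cons] at h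
      simp only [List.mem_cons]
      tauto

def pvSortedD {α : Type} (l : List (Bool × Int × Option α)) : Prop :=
  l.Pairwise (fun u v => v.2.1 ≤ u.2.1)

theorem pvSorted_ins {α : Type} (t : Bool × Int × Option α) (l : List (Bool × Int × Option α))
    (h : pvSortedD l) : pvSortedD (pvIns t l) := by
  induction l with
  | nil => simp [pvIns, pvSortedD]
  | cons u rest ih =>
    rcases h with _ | ⟨hu, hrest⟩
    by_cases hc : t.2.1 ≤ u.2.1
    · rw [pvIns, if_pos hc]
      refine List.Pairwise.cons ?_ (ih hrest)
      intro v hv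
      rcases pvMem_ins t v rest hv with rfl | hv
      · exact hc
      · exact hu v hv
    · rw [pvIns, if_neg hc]
      refine List.Pairwise.cons ?_ (List.Pairwise.cons hu hrest)
      intro v hv
      rcases List.mem_cons.mp hv with rfl | hv
      · omega
      · have := hu v hv; omega

theorem pvStep_first {α : Type} (t : Bool × Int × Option α) (s : List (Bool × Int × Option α))
    (hs : pvSortedD s) (ht : 0 ≤ t.2.1) (hlens : ∀ v ∈ s, 0 ≤ v.2.1) :
    pvStep (pvFirst s) t = pvFirst (pvIns t s) := by
  induction s with
  | nil =>
    obtain ⟨b, n, o⟩ := t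
    simp only at ht
    cases b
    · simp [pvIns, pvFirst, pvStep]
    · have hd : decide (n > (-1 : Int)) = true := decide_eq_true (by omega)
      simp [pvIns, pvFirst, pvStep, hd]
  | cons u rest ih =>
    obtain ⟨bu, nu, ou⟩ := u
    rcases hs with _ | ⟨hu, hrest⟩
    by_cases hc : t.2.1 ≤ nu
    · rw [pvIns, if_pos hc]
      cases bu
      · -- false head on both sides: reduce to the tail
        simp only [pvFirst, Bool.false_eq_true, if_false]
        exact ih hrest (fun v hv => hlens v (List.mem_cons_of_mem _ hv))
      · -- true head: the step is a no-op since t.2.1 ≤ nu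
        have hd : decide (t.2.1 > nu) = false := decide_eq_false (by omega)
        simp [pvFirst, pvStep, hd]
    · rw [pvIns, if_neg hc]
      have h0 : (0 : Int) ≤ nu := hlens (bu, nu, ou) List.mem_cons_self
      have hle : (pvFirst ((bu, nu, ou) :: rest)).1 ≤ nu := by
        refine pvFirst_fst_le _ nu (by omega) ?_
        intro v hv
        rcases List.mem_cons.mp hv with rfl | hv
        · simp
        · exact hu v hv
      obtain ⟨bt, nt, ot⟩ := t
      simp only at hc
      cases bt
      · simp [pvStep, pvFirst]
      · have hle' : (if bu = true then (nu, ou) else pvFirst rest).1 ≤ nu := hle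
        have hd : decide (nt > (if bu = true then (nu, ou) else pvFirst rest).1) = true :=
          decide_eq_true (by omega)
        simp [pvFirst, pvStep, hd]

theorem pvFold_sort {α : Type} (l : List (Bool × Int × Option α))
    (h : ∀ t ∈ l, 0 ≤ t.2.1) : pvFoldB l (-1, none) = pvFirst (pvSortD l) := by
  induction l using List.reverseRecOn with
  | nil => rfl
  | append_singleton l t ih =>
    have hl : ∀ u ∈ l, 0 ≤ u.2.1 := fun u hu => h u (List.mem_append_left _ hu)
    have ht : 0 ≤ t.2.1 := h t (List.mem_append_right _ List.mem_cons_self)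
    have hsorted : pvSortedD (pvSortD l) := by
      clear ih h hl ht
      induction l using List.reverseRecOn with
      | nil => simp [pvSortD, pvSortedD]
      | append_singleton l t ih =>
        rw [pvSortD, List.foldl_append]
        exact pvSorted_ins t _ ih
    have hmem : ∀ v ∈ pvSortD l, 0 ≤ v.2.1 := by
      intro v hv
      have : ∀ (l' : List (Bool × Int × Option α)) (v : Bool × Int × Option α), v ∈ pvSortD l' → v ∈ l' := by
        intro l'
        induction l' using List.reverseRecOn with
        | nil => intro v hv; simp [pvSortD] at hv
        | append_singleton l' t' ih' =>
          intro v hv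
          rw [pvSortD, List.foldl_append] at hv
          rcases pvMem_ins t' v _ hv with rfl | hv
          · exact List.mem_append_right _ List.mem_cons_self
          · exact List.mem_append_left _ (ih' v hv)
      exact hl v (this l v hv)
    rw [pvFoldB, List.foldl_append, pvSortD, List.foldl_append]
    simp only [List.foldl]
    rw [← pvFoldB, ih hl, pvStep_first t _ hsorted ht hmem]
    rfl

theorem pvKey (b1 b2 b3 b4 b5 b6 b7 b8 b9 b10 b11 b12 b13 b14 b15 : Bool) :
    (pvFoldB [(b1, 3, some "pptgen"), (b2, 10, some "pptgen"), (b3, 12, some "pptgen"),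
      (b4, 10, some "pptgen"), (b5, 12, some "pptgen"), (b6, 4, some "codegen"),
      (b7, 13, some "codegen"), (b8, 10, some "codegen"), (b9, 9, some "summarizer"),
      (b10, 7, some "summarizer"), (b11, 9, some "translator"), (b12, 11, some "translator"),
      (b13, 5, some "imagegen"), (b14, 7, some "imagegen"), (b15, 14, some "imagegen")]
      (-1, none)).2
    = pvChain [(b15, some "imagegen"), (b7, some "codegen"), (b3, some "pptgen"),
      (b5, some "pptgen"), (b12, some "translator"), (b2, some "pptgen"),
      (b4, some "pptgen"), (b8, some "codegen"), (b9, some "summarizer"),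
      (b11, some "translator"), (b10, some "summarizer"), (b14, some "imagegen"),
      (b13, some "imagegen"), (b6, some "codegen"), (b1, some "pptgen")] := by
  rw [pvFold_sort _ (by intro t ht; fin_cases ht <;> norm_num), pvFirst_snd]
  rfl

theorem pvInnerA_eq (models : List (String × String)) (nm : String) :
    pvInnerA models nm = if models.any (fun m => m.1 == nm) then some nm else none := by
  induction models with
  | nil => rfl
  | cons m rest ih =>
    simp only [pvInnerA, List.any_cons, ih]
    rcases Bool.eq_false_or_eq_true (m.1 == nm) with h | h <;>
      simp only [h, Bool.false_or, Bool.true_or, if_true, if_false, Bool.false_eq_true]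

theorem pvBridgeA (pl : String) (models : List (String × String)) (keys : List String) :
    pvOuterA pl models keys = pvChain (keys.map (fun kw =>
      (PySem.Str.isIn kw pl && models.any (fun m => m.1 == PySem.Dict.getD PROMPT_MODEL_MAP kw ""),
       some (PySem.Dict.getD PROMPT_MODEL_MAP kw "")))) := by
  induction keys with
  | nil => rfl
  | cons kw rest ih =>
    simp only [pvOuterA, List.map, pvChain, pvInnerA_eq, ← ih]
    by_cases h1 : PySem.Str.isIn kw pl <;>
      by_cases h2 : models.any (fun m => m.1 == PySem.Dict.getD PROMPT_MODEL_MAP kw "") <;>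
      simp [*]

theorem pvBridgeB (pl : String) (models : List (String × String))
    (l : List (String × String)) (st : Int × Option String) :
    List.foldl (fun (st : Int × Option String) p =>
        if PySem.Str.isIn p.1 pl && decide (PySem.Str.len p.1 > st.1)
            && models.any (fun m => m.1 == p.2)
        then (PySem.Str.len p.1, some p.2) else st) st l
    = pvFoldB (l.map fun p =>
        (PySem.Str.isIn p.1 pl && models.any (fun m => m.1 == p.2),
         PySem.Str.len p.1, some p.2)) st := by
  induction l generalizing st with
  | nil => rfl
  | cons p rest ih =>
    simp only [List.foldl, List.map, pvFoldB, pvStep]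
    rw [Bool.and_right_comm]
    rw [ih]
    rfl

theorem pvSortedKeys :
    PySem.List.sorted (PySem.Dict.keys PROMPT_MODEL_MAP) (fun k => PySem.Str.len k) true
    = ["generate image", "generate code", "presentation", "download ppt", "translation",
       "powerpoint", "create ppt", "write code", "summarize", "translate", "summary",
       "picture", "image", "code", "ppt"] := by decide

-- ===== VERDICT (by name: the statement is the Claim_ definition above) =====
theorem select_model_by_prompt_spec : Claim_equal_select_model_by_prompt := by
  intro prompt models _
  show select_model_by_prompt prompt models = select_model_by_prompt_alt prompt models
  simp only [select_model_by_prompt, select_model_by_prompt_alt]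
  rw [pvSortedKeys, pvBridgeA, pvBridgeB]
  simp only [List.map]
  exact (pvKey _ _ _ _ _ _ _ _ _ _ _ _ _ _ _).symm
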